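-- pv_equiv track=rewrite | github.com/KilHwanKim/practiceB | code/15649.py | dfs
-- ===== SOURCE A (Python) =====
-- def dfs(n,s):
--   result = []
--   stack = []
--   for i in range(1,n+1):
--     stack = [[i]]
--     while stack:
--       temp = stack.pop()
--       if len(temp) ==s:
--         result.append(temp)
--       else:
--         for i in range(n,0,-1):
--           if i not in temp:
--             stack.append(temp+[i])
--   return result
-- ===== SOURCE B (Python) =====
-- def dfs(n, s):
--     def rec(temp):
--         if len(temp) == s:
--             return [temp]
--         out = []
--         for j in range(1, n + 1):
--             if j not in temp:
--                 out.extend(rec(temp + [j]))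
--         return out
--     result = []
--     for i in range(1, n + 1):
--         result.extend(rec([i]))
--     return result
-- ===== Notes on version B (the rewrite author's own statement) =====
-- stated objective: simpler
-- what changed: Replaces the explicit-stack DFS (pushing children in descending order and popping from the end) by a direct recursive backtracking helper that explores candidates in ascending order; same lexicographic output.
import Mathlib
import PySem

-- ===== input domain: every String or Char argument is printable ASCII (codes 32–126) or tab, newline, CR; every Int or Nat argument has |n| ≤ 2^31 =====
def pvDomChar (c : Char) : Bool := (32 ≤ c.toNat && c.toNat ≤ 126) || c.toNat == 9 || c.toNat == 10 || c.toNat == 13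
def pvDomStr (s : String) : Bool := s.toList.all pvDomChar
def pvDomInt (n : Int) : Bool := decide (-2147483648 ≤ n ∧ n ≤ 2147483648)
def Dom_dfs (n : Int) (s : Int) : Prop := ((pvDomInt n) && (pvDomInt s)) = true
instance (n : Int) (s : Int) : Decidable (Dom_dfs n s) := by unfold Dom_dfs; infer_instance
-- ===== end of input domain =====

-- B replaces A's explicit-stack DFS (descending pushes, pop from the end) by a direct
-- recursive backtracking helper exploring candidates in ascending order; same output, same cost.


-- ===== PORT A =====
-- termination measure helpers: pvMiss n t = how many of 1..n are not yet in t;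
-- pvW weights a stack entry by (n+1)^pvMiss, pvSW sums the weights of a stack.
def pvMiss (n : Int) (t : List Int) : Nat :=
  ((PySem.List.pyRange 1 (n+1) 1).filter (fun j => decide (j ∉ t))).length

def pvW (n : Int) (t : List Int) : Nat := (n.toNat + 1) ^ pvMiss n t

def pvSW (n : Int) (st : List (List Int)) : Nat := (st.map (pvW n)).sum

theorem pvW_pos (n : Int) (t : List Int) : 0 < pvW n t :=
  Nat.pow_pos (Nat.succ_pos _)

theorem pvSW_append (n : Int) (xs ys : List (List Int)) :
    pvSW n (xs ++ ys) = pvSW n xs + pvSW n ys := by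
  simp [pvSW]

theorem pvMiss_le (n : Int) (t : List Int) : pvMiss n t ≤ n.toNat := by
  unfold pvMiss
  have h1 := List.length_filter_le (fun j => decide (j ∉ t)) (PySem.List.pyRange 1 (n+1) 1)
  have h2 := PySem.List.length_pyRange_one 1 (n+1)
  omega

-- adding a fresh candidate j ∈ 1..n to t drops the missing count by exactly one
theorem pvMiss_snoc (n : Int) (t : List Int) (j : Int)
    (hj1 : 1 ≤ j) (hj2 : j < n + 1) (hjt : j ∉ t) :
    pvMiss n (t ++ [j]) + 1 = pvMiss n t := by
  unfold pvMiss
  have hm : j ∈ (PySem.List.pyRange 1 (n+1) 1).filter (fun x => decide (x ∉ t)) := by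
    rw [List.mem_filter]
    exact ⟨PySem.List.mem_pyRange_one.mpr ⟨hj1, hj2⟩, by simpa using hjt⟩
  have hnd : ((PySem.List.pyRange 1 (n+1) 1).filter (fun x => decide (x ∉ t))).Nodup :=
    (PySem.List.nodup_pyRange_one 1 (n+1)).filter _
  have hsplit : (PySem.List.pyRange 1 (n+1) 1).filter (fun x => decide (x ∉ t ++ [j]))
      = ((PySem.List.pyRange 1 (n+1) 1).filter (fun x => decide (x ∉ t))).filter
          (fun x => x != j) := by
    rw [List.filter_filter]
    apply List.filter_congr
    intro x _
    by_cases hx : x ∈ t <;> by_cases hxj : x = j <;> simp [hx, hxj]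
  rw [hsplit, ← List.Nodup.erase_eq_filter hnd j]
  have := List.length_erase_of_mem hm
  have hlen1 : 1 ≤ ((PySem.List.pyRange 1 (n+1) 1).filter (fun x => decide (x ∉ t))).length :=
    List.length_pos_of_mem hm
  omega

-- the weight of all children pushed for temp is strictly below temp's own weight
theorem pvSW_pushes_lt (n : Int) (t : List Int) :
    pvSW n (((PySem.List.pyRange n 0 (-1)).filter (fun j => decide (j ∉ t))).map
      (fun j => t ++ [j])) < pvW n t := by
  set L := (PySem.List.pyRange n 0 (-1)).filter (fun j => decide (j ∉ t)) with hL
  set m := pvMiss n t with hm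
  have hLlen : L.length = m := by
    rw [hL, hm, pvMiss, PySem.List.pyRange_neg_one_eq_reverse, List.filter_reverse,
      List.length_reverse]
    norm_num
  have hconst : ∀ x ∈ L.map (fun j => pvW n (t ++ [j])), x = (n.toNat + 1) ^ (m - 1) := by
    intro x hx
    obtain ⟨j, hjL, rfl⟩ := List.mem_map.mp hx
    rw [hL, List.mem_filter] at hjL
    obtain ⟨hjr, hjt⟩ := hjL
    obtain ⟨hj0, hjn⟩ := PySem.List.mem_pyRange_neg_one.mp hjr
    have hjt' : j ∉ t := by simpa using hjt
    have := pvMiss_snoc n t j hj0 (by omega) hjt'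
    rw [pvW]
    congr 1
    omega
  have hsum : pvSW n (L.map (fun j => t ++ [j])) = L.length * (n.toNat + 1) ^ (m - 1) := by
    have : pvSW n (L.map (fun j => t ++ [j])) = (L.map (fun j => pvW n (t ++ [j]))).sum := by
      simp [pvSW, List.map_map, Function.comp_def]
    rw [this, List.sum_eq_card_nsmul _ _ hconst]
    simp
  rw [hsum, hLlen, pvW, ← hm]
  rcases Nat.eq_zero_or_pos m with h0 | hpos
  · simp [h0]
  · have hmle : m ≤ n.toNat := hm ▸ pvMiss_le n t
    calc m * (n.toNat + 1) ^ (m - 1)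
        < (n.toNat + 1) * (n.toNat + 1) ^ (m - 1) :=
          (Nat.mul_lt_mul_right (Nat.pow_pos (Nat.succ_pos _))).mpr (by omega)
      _ = (n.toNat + 1) ^ m := by
          rw [← pow_succ']
          congr 1
          omega

-- the while-loop of A: pop from the end; on a full-length temp record it,
-- otherwise push temp+[i] for i = n..1 with i not in temp
def dfsLoop (n s : Int) (result : List (List Int)) (stack : List (List Int)) :
    List (List Int) :=
  if h : stack = [] then result
  else
    let temp := stack.getLast h
    let rest := stack.dropLast
    if (temp.length : Int) = s then
      dfsLoop n s (result ++ [temp]) rest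
    else
      dfsLoop n s result
        (rest ++ ((PySem.List.pyRange n 0 (-1)).filter (fun j => decide (j ∉ temp))).map
          (fun j => temp ++ [j]))
  termination_by pvSW n stack
  decreasing_by
  · conv_rhs => rw [← List.dropLast_concat_getLast h]
    rw [pvSW_append]
    have := pvW_pos n (stack.getLast h)
    simp [pvSW]
    omega
  · conv_rhs => rw [← List.dropLast_concat_getLast h]
    rw [pvSW_append, pvSW_append]
    have h1 := pvSW_pushes_lt n (stack.getLast h)
    have h2 : pvSW n [stack.getLast h] = pvW n (stack.getLast h) := by simp [pvSW]
    omega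

def dfs (n : Int) (s : Int) : List (List Int) :=
  (PySem.List.pyRange 1 (n+1) 1).foldl (fun result i => dfsLoop n s result [[i]]) []

-- ===== PORT B =====
theorem pvMiss_snoc' (n : Int) (t : List Int) (j : Int)
    (hj : j ∈ (PySem.List.pyRange 1 (n+1) 1).filter (fun x => decide (x ∉ t))) :
    pvMiss n (t ++ [j]) < pvMiss n t := by
  rw [List.mem_filter] at hj
  obtain ⟨hjr, hjt⟩ := hj
  obtain ⟨hj1, hj2⟩ := PySem.List.mem_pyRange_one.mp hjr
  have := pvMiss_snoc n t j hj1 hj2 (by simpa using hjt)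
  omega

-- recursive backtracking: record temp when it has length s, else extend by each
-- unused candidate j = 1..n in ascending order ('.attach' only carries the
-- membership fact needed for termination; the computation is map-then-flatten,
-- i.e. Source B's extend loop)
def dfsRec (n s : Int) (temp : List Int) : List (List Int) :=
  if (temp.length : Int) = s then [temp]
  else
    (((PySem.List.pyRange 1 (n+1) 1).filter (fun j => decide (j ∉ temp))).attach.map
      (fun j => dfsRec n s (temp ++ [j.1]))).flatten
  termination_by pvMiss n temp
  decreasing_by
    exact pvMiss_snoc' n temp j.1 j.2

def dfs_alt (n : Int) (s : Int) : List (List Int) :=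
  (PySem.List.pyRange 1 (n+1) 1).flatMap (fun i => dfsRec n s [i])

-- ===== PRECONDITION & SPEC =====
def Spec_dfs (n : Int) (s : Int) (out : List (List Int)) : Prop := out = dfs_alt n s
instance (n : Int) (s : Int) (out : List (List Int)) : Decidable (Spec_dfs n s out) := by
  unfold Spec_dfs; infer_instance

-- ===== CLAIM (what is proved, stated in full; the proofs are below) =====
def Claim_equal_dfs : Prop := ∀ (n : Int) (s : Int), Dom_dfs n s → Spec_dfs n s (dfs n s)

-- ===== LEMMAS AND PROOFS =====

-- B's one-step expansion, written without the attach bookkeeping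
theorem dfsRec_expand (n s : Int) (temp : List Int)
    (hlen : ¬ ((temp.length : Int) = s)) :
    dfsRec n s temp
      = ((PySem.List.pyRange 1 (n+1) 1).filter (fun j => decide (j ∉ temp))).flatMap
          (fun j => dfsRec n s (temp ++ [j])) := by
  rw [dfsRec.eq_def, if_neg hlen, List.flatMap_def]
  simp

-- the descending pushes of A, read back-to-front, are exactly B's recursive expansion
theorem pushes_reverse_flatMap (n s : Int) (temp : List Int)
    (hlen : ¬ ((temp.length : Int) = s)) :
    ((((PySem.List.pyRange n 0 (-1)).filter (fun j => decide (j ∉ temp))).map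
        (fun j => temp ++ [j])).reverse).flatMap (dfsRec n s) = dfsRec n s temp := by
  rw [dfsRec_expand n s temp hlen, PySem.List.pyRange_neg_one_eq_reverse, List.filter_reverse,
    List.map_reverse, List.reverse_reverse, List.flatMap_map]
  norm_num

-- the stack machine of A computes B's recursion over the reversed stack
theorem dfsLoop_eq (n s : Int) (result : List (List Int)) (stack : List (List Int)) :
    dfsLoop n s result stack = result ++ stack.reverse.flatMap (dfsRec n s) := by
  induction result, stack using dfsLoop.induct n s with
  | case1 result => simp [dfsLoop]
  | case2 result stack h temp rest hlen ih =>
    rw [dfsLoop]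
    simp only [dif_neg h]
    split
    · rw [ih]
      have htemp : dfsRec n s (stack.getLast h) = [stack.getLast h] := by
        rw [dfsRec.eq_def, if_pos (show ((stack.getLast h).length : Int) = s from hlen)]
      conv_rhs => rw [← List.dropLast_concat_getLast h]
      simp [htemp, temp, rest, List.append_assoc]
    · exact absurd hlen ‹¬_›
  | case3 result stack h temp rest hlen ih =>
    rw [dfsLoop]
    simp only [dif_neg h]
    split
    · exact absurd ‹_› hlen
    · rw [ih]
      conv_rhs => rw [← List.dropLast_concat_getLast h]
      have hpush := pushes_reverse_flatMap n s (stack.getLast h)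
        (show ¬ ((stack.getLast h).length : Int) = s from hlen)
      simp only [List.reverse_append, List.flatMap_append]
      rw [hpush]
      simp [rest]

theorem dfs_foldl (n s : Int) (l : List Int) (acc : List (List Int)) :
    l.foldl (fun result i => dfsLoop n s result [[i]]) acc
      = acc ++ l.flatMap (fun i => dfsRec n s [i]) := by
  induction l generalizing acc with
  | nil => simp
  | cons x xs ih =>
    rw [List.foldl_cons, ih, dfsLoop_eq]
    simp

-- ===== VERDICT (by name: the statement is the Claim_ definition above) =====
theorem dfs_spec : Claim_equal_dfs := by
  intro n s _
  unfold Spec_dfs dfs dfs_alt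
  rw [dfs_foldl]
  simp
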